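-- pv_equiv track=rewrite | github.com/BarteG45/coding_exercises | python/6kyu/only_duplicates.py | only_duplicates
-- ===== SOURCE A (Python) =====
-- def only_duplicates(st):
--     answer = list(st)
--     final = ""
--     for letter in answer:
--         if answer.count(letter) > 1:
--             final += letter
--         else:
--             pass
--     return final
-- ===== SOURCE B (Python) =====
-- def only_duplicates(st):
--     s = sorted(st)
--     dups = set()
--     for a, b in zip(s, s[1:]):
--         if a == b:
--             dups.add(a)
--     return "".join(ch for ch in st if ch in dups)
-- ===== Notes on version B (the rewrite author's own statement) =====
-- stated objective: faster
-- what changed: Replaces A's per-character full rescan (list.count inside the loop, O(n^2)) with a sort-then-adjacent-scan: sort a copy, collect into a set every character equal to its sorted neighbour, then filter the original string by set membership.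
import Mathlib
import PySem

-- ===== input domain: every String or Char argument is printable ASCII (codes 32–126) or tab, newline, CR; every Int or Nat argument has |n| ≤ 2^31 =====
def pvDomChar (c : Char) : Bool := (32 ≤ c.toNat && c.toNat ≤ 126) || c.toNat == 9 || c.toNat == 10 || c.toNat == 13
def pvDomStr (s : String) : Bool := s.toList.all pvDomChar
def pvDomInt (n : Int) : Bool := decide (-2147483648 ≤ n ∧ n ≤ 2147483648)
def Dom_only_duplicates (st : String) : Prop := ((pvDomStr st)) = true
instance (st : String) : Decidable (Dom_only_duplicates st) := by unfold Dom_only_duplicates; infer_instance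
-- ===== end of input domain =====

-- B replaces A's per-character full rescans (answer.count in the loop) by sorting a copy,
-- collecting every character equal to its sorted neighbour into a set, then filtering
-- the original string by membership in that set; objective: faster (a better algorithm).

-- ===== PORT A =====
-- answer = list(st); final = ""; for letter in answer: if answer.count(letter) > 1: final += letter
def only_duplicates (st : String) : String :=
  let answer := st.toList
  let final : List Char :=
    answer.foldl (fun final letter =>
      if PySem.List.count answer letter > 1 then final ++ [letter] else final) []
  String.ofList final

-- ===== PORT B =====
-- s = sorted(st); dups = set()
-- for a, b in zip(s, s[1:]):
--     if a == b: dups.add(a)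
-- return "".join(ch for ch in st if ch in dups)
def only_duplicates_alt (st : String) : String :=
  let s := PySem.List.sorted st.toList (fun c => c) false
  let dups : PySem.Set Char :=
    (s.zip (PySem.List.slice s (some 1) none)).foldl
      (fun d p => if p.1 = p.2 then PySem.Set.add d p.1 else d) PySem.Set.empty
  String.ofList (st.toList.filter (fun ch => PySem.Set.contains dups ch))

-- ===== PRECONDITION & SPEC =====
def Spec_only_duplicates (st : String) (out : String) : Prop := out = only_duplicates_alt st
instance (st : String) (out : String) : Decidable (Spec_only_duplicates st out) := by unfold Spec_only_duplicates; infer_instance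

-- ===== CLAIM (what is proved, stated in full; the proofs are below) =====
def Claim_equal_only_duplicates : Prop := ∀ (st : String), Dom_only_duplicates st → Spec_only_duplicates st (only_duplicates st)

-- ===== LEMMAS AND PROOFS =====

-- membership in the dups-fold: c got added iff some adjacent pair is (c, c)
theorem mem_dups_foldl (ps : List (Char × Char)) (d : PySem.Set Char) (c : Char) :
    (c ∈ ps.foldl (fun d p => if p.1 = p.2 then PySem.Set.add d p.1 else d) d) ↔
      c ∈ d ∨ ∃ p ∈ ps, p.1 = p.2 ∧ p.1 = c := by
  induction ps generalizing d with
  | nil => simp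
  | cons p t ih =>
    simp only [List.foldl_cons, List.mem_cons, ih]
    split_ifs with h
    · rw [PySem.Set.mem_add]
      constructor
      · rintro (⟨hc | hc⟩ | hrest)
        · exact Or.inl hc
        · exact Or.inr ⟨p, Or.inl rfl, h, hc.symm⟩
        · rcases hrest with ⟨q, hq, hqq, hqc⟩
          exact Or.inr ⟨q, Or.inr hq, hqq, hqc⟩
      · rintro (hc | ⟨q, hq | hq, hqq, hqc⟩)
        · exact Or.inl (Or.inl hc)
        · exact Or.inl (Or.inr (hq ▸ hqc).symm)
        · exact Or.inr ⟨q, hq, hqq, hqc⟩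
    · constructor
      · rintro (hc | ⟨q, hq, hqq, hqc⟩)
        · exact Or.inl hc
        · exact Or.inr ⟨q, Or.inr hq, hqq, hqc⟩
      · rintro (hc | ⟨q, hq | hq, hqq, hqc⟩)
        · exact Or.inl hc
        · exact absurd (hq ▸ hqq) h
        · exact Or.inr ⟨q, hq, hqq, hqc⟩

-- on a nondecreasing list, an adjacent equal pair (c,c) exists iff c occurs more than once
theorem adj_pair_iff_count (l : List Char) (hl : l.Pairwise (· ≤ ·)) (c : Char) :
    (∃ p ∈ l.zip l.tail, p.1 = p.2 ∧ p.1 = c) ↔ 1 < l.count c := by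
  induction l with
  | nil => simp
  | cons a t ih =>
    cases t with
    | nil =>
      simp only [List.tail_cons, List.zip_nil_right, List.not_mem_nil, false_and, exists_false,
        false_iff, not_lt]
      simp only [List.count_cons, List.count_nil]
      split <;> omega
    | cons b t' =>
      have hab : a ≤ b := (List.pairwise_cons.mp hl).1 b (by simp)
      have ht : (b :: t').Pairwise (· ≤ ·) := (List.pairwise_cons.mp hl).2
      have iht := ih ht
      simp only [List.tail_cons, List.zip_cons_cons, List.mem_cons] at iht ⊢
      constructor
      · rintro ⟨p, hp | hp, hpq, hpc⟩
        · -- p = (a, b), a = b = c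
          subst hp
          simp only at hpq hpc
          subst hpc; subst hpq
          simp
        · have h1 : 1 < (b :: t').count c := iht.mp ⟨p, hp, hpq, hpc⟩
          rw [List.count_cons]
          omega
      · intro hcount
        by_cases hac : a = c
        · -- c at the head and again in the tail; sortedness forces b = c
          have hct : c ∈ b :: t' := by
            rw [List.count_cons] at hcount
            by_contra hn
            rw [List.count_eq_zero_of_not_mem hn] at hcount
            simp [hac] at hcount
          have hbc : b = c := by
            rcases List.mem_cons.mp hct with h | h
            · exact h.symm
            · have hbc' : b ≤ c := (List.pairwise_cons.mp ht).1 c h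
              have : c ≤ b := hac ▸ hab
              exact le_antisymm hbc' this
          exact ⟨(a, b), Or.inl rfl, by simp [hac, hbc], hac⟩
        · have h1 : 1 < (b :: t').count c := by
            rw [List.count_cons] at hcount
            simp [hac] at hcount
            omega
          rcases iht.mpr h1 with ⟨p, hp, hpq, hpc⟩
          exact ⟨p, Or.inr hp, hpq, hpc⟩

theorem only_duplicates_eq_alt (st : String) :
    only_duplicates st = only_duplicates_alt st := by
  unfold only_duplicates only_duplicates_alt
  dsimp only
  rw [PySem.List.foldl_append_ite_eq_filter, PySem.List.slice_from_one]
  congr 1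
  apply List.filter_congr
  intro c _
  have hperm := PySem.List.sorted_perm st.toList (fun c => c) false
  have hpair := PySem.List.sorted_pairwise st.toList (fun c => c)
  set s := PySem.List.sorted st.toList (fun c => c) false with hs
  have hcount : s.count c = st.toList.count c := hperm.count_eq c
  have hmem := mem_dups_foldl (s.zip s.tail) PySem.Set.empty c
  have hadj := adj_pair_iff_count s hpair c
  rw [PySem.List.count_eq]
  have hiff : (c ∈ (s.zip s.tail).foldl
      (fun d p => if p.1 = p.2 then PySem.Set.add d p.1 else d) PySem.Set.empty) ↔
      1 < List.count c st.toList := by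
    rw [hmem, hadj, hcount]
    simp [PySem.Set.empty]
  by_cases hdup : 1 < List.count c st.toList
  · simp only [gt_iff_lt, hdup, decide_true]
    symm
    simpa using (PySem.Set.contains_iff _ _).mpr (hiff.mpr hdup)
  · simp only [gt_iff_lt, hdup, decide_false]
    symm
    rw [Bool.eq_false_iff]
    intro h
    exact hdup (hiff.mp ((PySem.Set.contains_iff _ _).mp (by simpa using h)))

-- ===== VERDICT (by name: the statement is the Claim_ definition above) =====
theorem only_duplicates_spec : Claim_equal_only_duplicates := by
  intro st _
  unfold Spec_only_duplicates
  exact only_duplicates_eq_alt st
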